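-- pv_equiv track=rewrite | github.com/kimye0808/data-science | temp/clustering_visualization.py | identify_cluster_types
-- ===== SOURCE A (Python) =====
-- def identify_cluster_types(texts, labels, embeddings):
--     cluster_texts = {}
--     for i, label in enumerate(labels):
--         if label != -1:
--             if label not in cluster_texts:
--                 cluster_texts[label] = []
--             cluster_texts[label].append(embeddings[i][0])
--
--     cluster_types = {}
--     for cid, texts in cluster_texts.items():
--         text_combined = " ".join(texts)
--         if "order" in text_combined or "delivery" in text_combined:
--             cluster_types[cid] = "Delivery Inquiry"
--         elif "payment" in text_combined or "bill" in text_combined: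
--             cluster_types[cid] = "Payment Issue"
--         elif "service" in text_combined or "support" in text_combined:
--             cluster_types[cid] = "Service Issue"
--         else:
--             cluster_types[cid] = "Other"
--     return cluster_types
-- ===== SOURCE B (Python) =====
-- def identify_cluster_types(texts, labels, embeddings):
--     flags = {}
--     for i, label in enumerate(labels):
--         if label != -1:
--             t = embeddings[i][0]
--             d, p, s = flags.get(label, (False, False, False))
--             flags[label] = (d or "order" in t or "delivery" in t,
--                             p or "payment" in t or "bill" in t,
--                             s or "service" in t or "support" in t)
--     return {cid: ("Delivery Inquiry" if d else
--                   "Payment Issue" if p else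
--                   "Service Issue" if s else "Other")
--             for cid, (d, p, s) in flags.items()}
-- ===== Notes on version B (the rewrite author's own statement) =====
-- stated objective: alternative
-- what changed: B replaces A's two-phase grouping (collect per-cluster text lists, then join each list into one string and substring-scan the join) by a single pass that maintains three boolean keyword flags per cluster and resolves them to a type at the end; no text lists or joined strings are ever built.
import Mathlib
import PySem

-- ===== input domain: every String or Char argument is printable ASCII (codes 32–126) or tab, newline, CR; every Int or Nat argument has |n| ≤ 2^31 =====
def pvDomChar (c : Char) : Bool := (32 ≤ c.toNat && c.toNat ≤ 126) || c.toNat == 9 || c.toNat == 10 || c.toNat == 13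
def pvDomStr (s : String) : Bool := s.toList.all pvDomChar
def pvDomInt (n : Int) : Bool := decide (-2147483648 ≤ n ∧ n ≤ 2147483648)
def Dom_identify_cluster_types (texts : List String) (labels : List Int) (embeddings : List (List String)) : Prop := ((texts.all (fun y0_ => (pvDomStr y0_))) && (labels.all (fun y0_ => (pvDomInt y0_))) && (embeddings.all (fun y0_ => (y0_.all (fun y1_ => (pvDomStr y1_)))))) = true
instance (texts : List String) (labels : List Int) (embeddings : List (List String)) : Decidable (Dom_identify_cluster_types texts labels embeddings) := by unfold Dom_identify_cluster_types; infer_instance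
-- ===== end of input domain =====

-- B replaces A's per-cluster text lists and joined-string scan by per-cluster boolean keyword
-- flags maintained in the single pass over the labels (alternative decomposition, same cost class).

-- ===== PORT A =====
def identify_cluster_types (texts : List String) (labels : List Int) (embeddings : List (List String)) : List (Int × String) :=
  let cluster_texts : PySem.Dict Int (List String) :=
    (PySem.List.enumerate labels 0).foldl (fun d p =>
      if p.2 ≠ -1 then
        d.modify p.2 [] (fun ts => ts ++ [PySem.List.pyGetD (PySem.List.pyGetD embeddings p.1 []) 0 ""])
      else d) PySem.Dict.empty
  let cluster_types : PySem.Dict Int String :=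
    cluster_texts.items.foldl (fun d q =>
      let tc := PySem.Str.join " " q.2
      if PySem.Str.isIn "order" tc || PySem.Str.isIn "delivery" tc then d.insert q.1 "Delivery Inquiry"
      else if PySem.Str.isIn "payment" tc || PySem.Str.isIn "bill" tc then d.insert q.1 "Payment Issue"
      else if PySem.Str.isIn "service" tc || PySem.Str.isIn "support" tc then d.insert q.1 "Service Issue"
      else d.insert q.1 "Other") PySem.Dict.empty
  cluster_types.items

-- ===== PORT B =====
def pvFlagsUpd (t : String) (v : Bool × Bool × Bool) : Bool × Bool × Bool :=
  (v.1 || (PySem.Str.isIn "order" t || PySem.Str.isIn "delivery" t),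
   v.2.1 || (PySem.Str.isIn "payment" t || PySem.Str.isIn "bill" t),
   v.2.2 || (PySem.Str.isIn "service" t || PySem.Str.isIn "support" t))

def pvResolve (v : Bool × Bool × Bool) : String :=
  if v.1 then "Delivery Inquiry"
  else if v.2.1 then "Payment Issue"
  else if v.2.2 then "Service Issue"
  else "Other"

def identify_cluster_types_alt (texts : List String) (labels : List Int) (embeddings : List (List String)) : List (Int × String) :=
  let flags : PySem.Dict Int (Bool × Bool × Bool) :=
    (PySem.List.enumerate labels 0).foldl (fun d p =>
      if p.2 ≠ -1 then
        d.modify p.2 (false, false, false)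
          (pvFlagsUpd (PySem.List.pyGetD (PySem.List.pyGetD embeddings p.1 []) 0 ""))
      else d) PySem.Dict.empty
  (flags.items.foldl (fun d q => d.insert q.1 (pvResolve q.2)) (PySem.Dict.empty : PySem.Dict Int String)).items

-- ===== PRECONDITION & SPEC =====
-- Pre_ excludes exactly the inputs where Python A raises IndexError: some index i with
-- labels[i] != -1 but embeddings has no i-th row or that row is empty (embeddings[i][0] fails).
def Pre_identify_cluster_types (texts : List String) (labels : List Int) (embeddings : List (List String)) : Prop :=
  ∀ i : Nat, i < labels.length → labels.getD i 0 ≠ -1 →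
    (i < embeddings.length ∧ embeddings.getD i [] ≠ [])
instance (texts : List String) (labels : List Int) (embeddings : List (List String)) : Decidable (Pre_identify_cluster_types texts labels embeddings) := by unfold Pre_identify_cluster_types; infer_instance

def pvWitness_identify_cluster_types : List String × List Int × List (List String) :=
  (["x"], [0, -1, 2], [["please order now"], [], ["support me", "z"]])

def Spec_identify_cluster_types (texts : List String) (labels : List Int) (embeddings : List (List String)) (out : List (Int × String)) : Prop := out = identify_cluster_types_alt texts labels embeddings
instance (texts : List String) (labels : List Int) (embeddings : List (List String)) (out : List (Int × String)) : Decidable (Spec_identify_cluster_types texts labels embeddings out) := by unfold Spec_identify_cluster_types; infer_instance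

-- ===== CLAIM (what is proved, stated in full; the proofs are below) =====
def Claim_equal_identify_cluster_types : Prop := ∀ (texts : List String) (labels : List Int) (embeddings : List (List String)), Dom_identify_cluster_types texts labels embeddings → Pre_identify_cluster_types texts labels embeddings → Spec_identify_cluster_types texts labels embeddings (identify_cluster_types texts labels embeddings)

-- ===== LEMMAS AND PROOFS =====

-- If a pattern p avoids a character c, an occurrence of p cannot cross c.
theorem pv_prefix_append_cons {c : Char} {p a b : List Char} (hc : c ∉ p)
    (h : p <+: a ++ c :: b) : p <+: a := by
  induction p generalizing a with
  | nil => exact List.nil_prefix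
  | cons x q ih =>
    cases a with
    | nil =>
      rcases h with ⟨t, ht⟩
      simp at ht
      exact absurd (ht.1 ▸ List.mem_cons_self) hc
    | cons y a' =>
      rcases h with ⟨t, ht⟩
      simp at ht
      obtain ⟨hxy, ht'⟩ := ht
      have hq : q <+: a' := ih (fun hm => hc (List.mem_cons_of_mem _ hm)) ⟨t, ht'⟩
      obtain ⟨u, hu⟩ := hq
      exact ⟨u, by simp [hxy, hu]⟩

theorem pv_infix_append_cons {c : Char} {p : List Char} (hc : c ∉ p) (a b : List Char) :
    p <:+: a ++ c :: b ↔ p <:+: a ∨ p <:+: b := by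
  induction a with
  | nil =>
    simp only [List.nil_append, List.infix_cons_iff]
    constructor
    · rintro (hpre | hinf)
      · cases p with
        | nil => exact Or.inl (List.nil_infix)
        | cons x q =>
          rcases hpre with ⟨t, ht⟩
          simp at ht
          exact absurd (ht.1 ▸ List.mem_cons_self) hc
      · exact Or.inr hinf
    · rintro (hinf | hinf)
      · have : p = [] := List.eq_nil_of_infix_nil hinf
        subst this
        exact Or.inr List.nil_infix
      · exact Or.inr hinf
  | cons y a' ih =>
    constructor
    · intro h
      have h' : p <:+: y :: (a' ++ c :: b) := by simpa using h
      rcases List.infix_cons_iff.mp h' with hpre | hinf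
      · have hpre' : p <+: (y :: a') ++ c :: b := by simpa using hpre
        exact Or.inl (pv_prefix_append_cons hc hpre').isInfix
      · rcases ih.mp hinf with h1 | h1
        · exact Or.inl (h1.trans (List.suffix_cons y a').isInfix)
        · exact Or.inr h1
    · rintro (h | h)
      · rcases List.infix_cons_iff.mp h with hpre | hinf
        · exact (hpre.trans (List.prefix_append (y :: a') (c :: b))).isInfix
        · have h2 : p <:+: a' ++ c :: b := ih.mpr (Or.inl hinf)
          have : p <:+: y :: (a' ++ c :: b) := h2.trans (List.suffix_cons y (a' ++ c :: b)).isInfix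
          simpa using this
      · have h2 : p <:+: a' ++ c :: b := ih.mpr (Or.inr h)
        have : p <:+: y :: (a' ++ c :: b) := h2.trans (List.suffix_cons y (a' ++ c :: b)).isInfix
        simpa using this

theorem pv_infix_join_single {c : Char} {p : List Char} (hc : c ∉ p) (hp : p ≠ [])
    (ls : List (List Char)) :
    (p <:+: PySem.Chars.join [c] ls) ↔ ∃ l ∈ ls, p <:+: l := by
  induction ls with
  | nil =>
    simp [PySem.Chars.join_nil]
    intro h
    exact hp h
  | cons a rest ih =>
    cases rest with
    | nil => simp [PySem.Chars.join_singleton]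
    | cons b l =>
      rw [PySem.Chars.join_cons_cons]
      have : a ++ [c] ++ PySem.Chars.join [c] (b :: l) = a ++ c :: PySem.Chars.join [c] (b :: l) := by simp
      rw [this, pv_infix_append_cons hc, ih]
      simp

theorem pv_isIn_join (w : String) (hc : ' ' ∉ w.toList) (hp : w.toList ≠ [])
    (ts : List String) :
    PySem.Str.isIn w (PySem.Str.join " " ts) = ts.any (fun t => PySem.Str.isIn w t) := by
  rcases h : ts.any (fun t => PySem.Str.isIn w t) with _ | _
  · rw [Bool.eq_false_iff]
    intro habs
    rw [PySem.Str.isIn_iff_infix, PySem.Str.toList_join] at habs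
    have hsep : (" " : String).toList = [' '] := rfl
    rw [hsep, pv_infix_join_single hc hp] at habs
    obtain ⟨l, hl, hinf⟩ := habs
    obtain ⟨t, ht, rfl⟩ := List.mem_map.mp hl
    have : ts.any (fun t => PySem.Str.isIn w t) = true :=
      List.any_eq_true.mpr ⟨t, ht, (PySem.Str.isIn_iff_infix w t).mpr hinf⟩
    rw [h] at this; exact absurd this (by simp)
  · obtain ⟨t, ht, hw⟩ := List.any_eq_true.mp h
    rw [PySem.Str.isIn_iff_infix, PySem.Str.toList_join]
    have hsep : (" " : String).toList = [' '] := rfl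
    rw [hsep, pv_infix_join_single hc hp]
    exact ⟨t.toList, List.mem_map.mpr ⟨t, ht, rfl⟩, (PySem.Str.isIn_iff_infix w t).mp hw⟩

-- generic fold/modify value characterisation
theorem pv_getD_foldl_modify {V : Type} (l : List (Int × String)) (d : PySem.Dict Int V)
    (c : Int) (dfl : V) (f : String → V → V) :
    ((l.foldl (fun d q => d.modify q.1 dfl (f q.2)) d).getD c dfl)
      = (l.filter (fun q => q.1 == c)).foldl (fun v q => f q.2 v) (d.getD c dfl) := by
  induction l generalizing d with
  | nil => rfl
  | cons q l ih =>
    simp only [List.foldl_cons, List.filter_cons]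
    rw [ih]
    by_cases hq : q.1 = c
    · simp [hq]
    · have : (q.1 == c) = false := by simp [hq]
      rw [this]
      simp only [Bool.false_eq_true, if_false]
      congr 1
      rw [PySem.Dict.getD_modify]
      simp [Ne.symm hq]

theorem pv_foldl_flags_str (ms : List String) (a : Bool × Bool × Bool) :
    ms.foldl (fun v t => pvFlagsUpd t v) a
      = (a.1 || ms.any (fun t => PySem.Str.isIn "order" t || PySem.Str.isIn "delivery" t),
         a.2.1 || ms.any (fun t => PySem.Str.isIn "payment" t || PySem.Str.isIn "bill" t),
         a.2.2 || ms.any (fun t => PySem.Str.isIn "service" t || PySem.Str.isIn "support" t)) := by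
  induction ms generalizing a with
  | nil => simp
  | cons t ms ih =>
    simp only [List.foldl_cons, List.any_cons]
    rw [ih]
    simp [pvFlagsUpd, Bool.or_assoc]

theorem pv_items_map_getD {V W : Type} (d : PySem.Dict Int V) (g : Int → V → W) (dfl : V)
    (hnd : d.keys.Nodup) :
    d.items.map (fun q => (q.1, g q.1 q.2)) = d.keys.map (fun k => (k, g k (d.getD k dfl))) := by
  have hk : d.keys = d.items.map Prod.fst := rfl
  rw [hk, List.map_map]
  apply List.map_congr_left
  intro q hq
  have h1 : d.get? q.1 = some q.2 := PySem.Dict.get?_of_mem_items d (by simpa using hq) hnd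
  have h2 : d.getD q.1 dfl = q.2 := PySem.Dict.getD_of_get?_eq_some d dfl h1
  simp [h2]

def pvClassifyA (ts : List String) : String :=
  let tc := PySem.Str.join " " ts
  if PySem.Str.isIn "order" tc || PySem.Str.isIn "delivery" tc then "Delivery Inquiry"
  else if PySem.Str.isIn "payment" tc || PySem.Str.isIn "bill" tc then "Payment Issue"
  else if PySem.Str.isIn "service" tc || PySem.Str.isIn "support" tc then "Service Issue"
  else "Other"

theorem pv_any_or (l : List String) (p q : String → Bool) :
    l.any (fun t => p t || q t) = (l.any p || l.any q) := by
  induction l with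
  | nil => simp
  | cons a l ih => simp [ih, Bool.or_assoc, Bool.or_left_comm]

theorem pv_classify (ts : List String) :
    pvClassifyA ts
      = pvResolve (ts.any (fun t => PySem.Str.isIn "order" t || PySem.Str.isIn "delivery" t),
                   ts.any (fun t => PySem.Str.isIn "payment" t || PySem.Str.isIn "bill" t),
                   ts.any (fun t => PySem.Str.isIn "service" t || PySem.Str.isIn "support" t)) := by
  unfold pvClassifyA pvResolve
  simp only []
  rw [pv_isIn_join "order" (by decide) (by decide),
      pv_isIn_join "delivery" (by decide) (by decide),
      pv_isIn_join "payment" (by decide) (by decide),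
      pv_isIn_join "bill" (by decide) (by decide),
      pv_isIn_join "service" (by decide) (by decide),
      pv_isIn_join "support" (by decide) (by decide),
      ← pv_any_or, ← pv_any_or, ← pv_any_or]

theorem pv_foldl_skip {σ : Type} (l : List (Int × Int)) (f : σ → (Int × Int) → σ) (s : σ) :
    l.foldl (fun d p => if p.2 ≠ -1 then f d p else d) s
      = (l.filter (fun p => p.2 != -1)).foldl f s := by
  induction l generalizing s with
  | nil => rfl
  | cons p l ih =>
    rw [List.foldl_cons, List.filter_cons]
    by_cases h : p.2 = -1
    · have h2 : (p.2 != -1) = false := by simp [h]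
      rw [if_neg (not_not_intro h), h2]
      simpa using ih s
    · have h2 : (p.2 != -1) = true := by simp [h]
      rw [if_pos h, h2, if_pos rfl, List.foldl_cons]
      exact ih (f s p)

theorem pv_master (L : List (Int × Int)) (text : Int → String) :
    (let ct : PySem.Dict Int (List String) :=
       L.foldl (fun d p => if p.2 ≠ -1 then d.modify p.2 [] (fun ts => ts ++ [text p.1]) else d)
         PySem.Dict.empty
     (ct.items.foldl (fun d q =>
        let tc := PySem.Str.join " " q.2
        if PySem.Str.isIn "order" tc || PySem.Str.isIn "delivery" tc then d.insert q.1 "Delivery Inquiry"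
        else if PySem.Str.isIn "payment" tc || PySem.Str.isIn "bill" tc then d.insert q.1 "Payment Issue"
        else if PySem.Str.isIn "service" tc || PySem.Str.isIn "support" tc then d.insert q.1 "Service Issue"
        else d.insert q.1 "Other") (PySem.Dict.empty : PySem.Dict Int String)).items)
    = (let fl : PySem.Dict Int (Bool × Bool × Bool) :=
         L.foldl (fun d p => if p.2 ≠ -1 then d.modify p.2 (false, false, false) (pvFlagsUpd (text p.1)) else d)
           PySem.Dict.empty
       (fl.items.foldl (fun d q => d.insert q.1 (pvResolve q.2)) (PySem.Dict.empty : PySem.Dict Int String)).items) := by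
  simp only []
  rw [pv_foldl_skip, pv_foldl_skip]
  have hM1 : (L.filter (fun p => p.2 != -1)).foldl
      (fun d p => d.modify p.2 [] (fun ts => ts ++ [text p.1])) PySem.Dict.empty
      = ((L.filter (fun p => p.2 != -1)).map (fun p => (p.2, text p.1))).foldl
          (fun d q => d.modify q.1 [] (fun ts => ts ++ [q.2])) PySem.Dict.empty :=
    (List.foldl_map (f := fun p : Int × Int => (p.2, text p.1))
      (g := fun (d : PySem.Dict Int (List String)) (q : Int × String) => d.modify q.1 [] (fun ts => ts ++ [q.2]))).symm
  have hM2 : (L.filter (fun p => p.2 != -1)).foldl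
      (fun d p => d.modify p.2 (false, false, false) (pvFlagsUpd (text p.1))) PySem.Dict.empty
      = ((L.filter (fun p => p.2 != -1)).map (fun p => (p.2, text p.1))).foldl
          (fun d q => d.modify q.1 (false, false, false) (pvFlagsUpd q.2)) PySem.Dict.empty :=
    (List.foldl_map (f := fun p : Int × Int => (p.2, text p.1))
      (g := fun (d : PySem.Dict Int (Bool × Bool × Bool)) (q : Int × String) => d.modify q.1 (false, false, false) (pvFlagsUpd q.2))).symm
  rw [hM1, hM2]
  generalize (L.filter (fun p => p.2 != -1)).map (fun p => (p.2, text p.1)) = M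
  set ct : PySem.Dict Int (List String) :=
    M.foldl (fun d q => d.modify q.1 [] (fun ts => ts ++ [q.2])) PySem.Dict.empty with hct
  set fl : PySem.Dict Int (Bool × Bool × Bool) :=
    M.foldl (fun d q => d.modify q.1 (false, false, false) (pvFlagsUpd q.2)) PySem.Dict.empty with hfl
  -- keys agree and are nodup
  have hkct : ct.keys = PySem.Set.update ([] : List Int) (M.map (fun q => q.1)) := by
    rw [hct, PySem.Dict.keys_foldl_modify_key M (fun q => q.1) [] (fun _ q => fun ts => ts ++ [q.2]),
        PySem.Dict.keys_empty]
  have hkfl : fl.keys = PySem.Set.update ([] : List Int) (M.map (fun q => q.1)) := by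
    rw [hfl, PySem.Dict.keys_foldl_modify_key M (fun q => q.1) (false, false, false)
          (fun _ q => pvFlagsUpd q.2), PySem.Dict.keys_empty]
  have hkeys : ct.keys = fl.keys := by rw [hkct, hkfl]
  have hndct : ct.keys.Nodup := by
    rw [hct]
    exact PySem.Dict.nodup_keys_foldl_modify_key M (fun q => q.1) [] (fun _ q => fun ts => ts ++ [q.2])
      PySem.Dict.empty (by simp [PySem.Dict.keys_empty])
  have hndfl : fl.keys.Nodup := by rw [← hkeys]; exact hndct
  -- second loops: folds of fresh inserts
  have hbody : (fun (d : PySem.Dict Int String) (q : Int × List String) =>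
      let tc := PySem.Str.join " " q.2
      if PySem.Str.isIn "order" tc || PySem.Str.isIn "delivery" tc then d.insert q.1 "Delivery Inquiry"
      else if PySem.Str.isIn "payment" tc || PySem.Str.isIn "bill" tc then d.insert q.1 "Payment Issue"
      else if PySem.Str.isIn "service" tc || PySem.Str.isIn "support" tc then d.insert q.1 "Service Issue"
      else d.insert q.1 "Other")
      = fun d q => d.insert q.1 (pvClassifyA q.2) := by
    funext d q
    simp only [pvClassifyA]
    split_ifs <;> rfl
  rw [hbody]
  have hfreshA := PySem.Dict.items_foldl_insert_fresh ct.items (fun q => q.1)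
    (fun q => pvClassifyA q.2) PySem.Dict.empty
    (fun a _ => PySem.Dict.contains_empty a.1) hndct
  have hfreshB := PySem.Dict.items_foldl_insert_fresh fl.items (fun q => q.1)
    (fun q => pvResolve q.2) PySem.Dict.empty
    (fun a _ => PySem.Dict.contains_empty a.1) hndfl
  rw [hfreshA, hfreshB]
  rw [pv_items_map_getD ct (fun _ v => pvClassifyA v) [] hndct,
      pv_items_map_getD fl (fun _ v => pvResolve v) (false, false, false) hndfl,
      ← hkeys]
  apply List.map_congr_left
  intro k _
  have hv1 : ct.getD k [] = (M.filter (fun q => q.1 == k)).map (fun q => q.2) := by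
    rw [hct, PySem.Dict.getD_foldl_modify_append M PySem.Dict.empty k]
    simp [PySem.Dict.getD_empty]
  have hv2 : fl.getD k (false, false, false)
      = ((M.filter (fun q => q.1 == k)).map (fun q => q.2)).foldl
          (fun v t => pvFlagsUpd t v) (false, false, false) := by
    rw [hfl, pv_getD_foldl_modify M PySem.Dict.empty k (false, false, false) pvFlagsUpd,
        PySem.Dict.getD_empty]
    exact (List.foldl_map (f := fun q : Int × String => q.2)
      (g := fun (v : Bool × Bool × Bool) (t : String) => pvFlagsUpd t v)).symm
  have hv2' : fl.getD k (false, false, false)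
      = (((M.filter (fun q => q.1 == k)).map (fun q => q.2)).any
           (fun t => PySem.Str.isIn "order" t || PySem.Str.isIn "delivery" t),
         ((M.filter (fun q => q.1 == k)).map (fun q => q.2)).any
           (fun t => PySem.Str.isIn "payment" t || PySem.Str.isIn "bill" t),
         ((M.filter (fun q => q.1 == k)).map (fun q => q.2)).any
           (fun t => PySem.Str.isIn "service" t || PySem.Str.isIn "support" t)) := by
    rw [hv2]
    have := pv_foldl_flags_str ((M.filter (fun q => q.1 == k)).map (fun q => q.2)) (false, false, false)
    simpa using this
  rw [hv1, hv2', pv_classify]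

-- ===== VERDICT (by name: the statement is the Claim_ definition above) =====
theorem identify_cluster_types_spec : Claim_equal_identify_cluster_types := by
  intro texts labels embeddings _ _
  unfold Spec_identify_cluster_types
  exact pv_master (PySem.List.enumerate labels 0)
    (fun i => PySem.List.pyGetD (PySem.List.pyGetD embeddings i []) 0 "")
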